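-- pv_equiv track=rewrite | github.com/KornevEK/python_learning_materials | sorting/sorting_algorithms/radix_sort.py | radix_sort_part
-- ===== SOURCE A (Python) =====
-- def radix_sort_part(arr, position):
--     d = {c : [] for c in '0123456789'}
--     for e in arr:
--         c = e[position]
--         d[c].append(e)
--     res = []
--     for c in '0123456789':
--         res.extend(d[c])
--     return res
-- ===== SOURCE B (Python) =====
-- def radix_sort_part(arr, position):
--     return sorted(arr, key=lambda e: e[position])
-- ===== Notes on version B (the rewrite author's own statement) =====
-- stated objective: idiomatic
-- what changed: Replaces the ten-bucket dict distribution and concatenation with a single stable sorted() call keyed on the character at the given position; stability reproduces A's preservation of input order among equal digits.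
import Mathlib
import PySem

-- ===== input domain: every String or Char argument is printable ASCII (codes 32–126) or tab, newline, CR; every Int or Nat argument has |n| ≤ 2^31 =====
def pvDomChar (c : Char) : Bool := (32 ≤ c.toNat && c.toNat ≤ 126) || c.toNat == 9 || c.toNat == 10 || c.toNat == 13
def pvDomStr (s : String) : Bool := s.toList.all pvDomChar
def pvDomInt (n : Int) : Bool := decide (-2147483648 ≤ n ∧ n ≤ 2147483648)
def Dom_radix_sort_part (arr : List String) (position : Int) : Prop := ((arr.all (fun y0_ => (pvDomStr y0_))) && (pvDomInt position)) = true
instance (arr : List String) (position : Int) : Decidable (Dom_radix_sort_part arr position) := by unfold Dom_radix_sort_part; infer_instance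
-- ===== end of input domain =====

-- B replaces A's ten-bucket dict distribution with a single stable sorted() call keyed on
-- the character at `position` (idiomatic; stability keeps A's order among equal digits).

-- ===== PORT A =====
-- the key character of e: e[position] (Python raises on out-of-range / non-digit; those inputs are outside Pre_)
def pvKey (position : Int) (e : String) : Char := (PySem.Str.pyGet? e position).getD ' '

def radix_sort_part (arr : List String) (position : Int) : List String :=
  let d0 : PySem.Dict Char (List String) :=
    ("0123456789".toList).foldl (fun d c => d.insert c ([] : List String)) PySem.Dict.empty
  let d := arr.foldl (fun d e => d.modify (pvKey position e) [] (fun l => l ++ [e])) d0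
  ("0123456789".toList).foldl (fun res c => res ++ d.getD c []) []

-- ===== PORT B =====
def radix_sort_part_alt (arr : List String) (position : Int) : List String :=
  PySem.List.sorted arr (pvKey position) false

-- ===== PRECONDITION & SPEC =====
-- Pre_: exactly the inputs on which A returns normally: every element has a character at
-- `position` and that character is a digit (otherwise Python raises IndexError resp. KeyError).
def Pre_radix_sort_part (arr : List String) (position : Int) : Prop :=
  (arr.all (fun e => (PySem.Str.pyGet? e position).any PySem.Chars.isdigit)) = true
instance (arr : List String) (position : Int) : Decidable (Pre_radix_sort_part arr position) := by
  unfold Pre_radix_sort_part; infer_instance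

def pvWitness_radix_sort_part : List String × Int := (["3a", "17", "25", "09", "1"], 0)

def Spec_radix_sort_part (arr : List String) (position : Int) (out : List String) : Prop := out = radix_sort_part_alt arr position
instance (arr : List String) (position : Int) (out : List String) : Decidable (Spec_radix_sort_part arr position out) := by unfold Spec_radix_sort_part; infer_instance

-- ===== CLAIM (what is proved, stated in full; the proofs are below) =====
def Claim_equal_radix_sort_part : Prop := ∀ (arr : List String) (position : Int), Dom_radix_sort_part arr position → Pre_radix_sort_part arr position → Spec_radix_sort_part arr position (radix_sort_part arr position)

-- ===== LEMMAS AND PROOFS =====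

-- a digit character is one of '0'..'9'
theorem pv_isdigit_mem (c : Char) (h : PySem.Chars.isdigit c = true) : c ∈ ("0123456789".toList) := by
  simp [PySem.Chars.isdigit] at h
  obtain ⟨h1, h2⟩ := h
  have hn1 : 48 ≤ c.toNat := h1
  have hn2 : c.toNat ≤ 57 := h2
  have : c = '0' ∨ c = '1' ∨ c = '2' ∨ c = '3' ∨ c = '4' ∨ c = '5' ∨ c = '6' ∨ c = '7' ∨ c = '8' ∨ c = '9' := by
    have := Char.ofNat_toNat c
    interval_cases h : c.toNat <;> simp_all [← this]
  rcases this with rfl|rfl|rfl|rfl|rfl|rfl|rfl|rfl|rfl|rfl <;> decide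

-- inserting before a block it should come after skips the block
theorem pv_insertBy_append {α : Type} (before : α → α → Bool) (x : α) (ys zs : List α)
    (h : ∀ y ∈ ys, before x y = false) :
    PySem.List.insertBy before x (ys ++ zs) = ys ++ PySem.List.insertBy before x zs := by
  induction ys with
  | nil => rfl
  | cons y t ih =>
      have hy := h y (by simp)
      simp [PySem.List.insertBy, hy, ih (fun a ha => h a (by simp [ha]))]

-- inserting before a block it precedes entirely prepends
theorem pv_insertBy_all_before {α : Type} (before : α → α → Bool) (x : α) (zs : List α)
    (h : ∀ z ∈ zs, before x z = true) :
    PySem.List.insertBy before x zs = x :: zs := by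
  cases zs with
  | nil => rfl
  | cons z t => simp [PySem.List.insertBy, h z (by simp)]

-- a stable sort whose keys all lie in a strictly increasing list ks is the concatenation,
-- over ks in order, of the in-order filters by key value
theorem pv_sorted_buckets {α κ : Type} [LinearOrder κ] [BEq κ] [LawfulBEq κ] (key : α → κ)
    (ks : List κ) (hks : ks.Pairwise (· < ·)) :
    ∀ (arr : List α), (∀ e ∈ arr, key e ∈ ks) →
      PySem.List.sorted arr key false = ks.flatMap (fun c => arr.filter (fun e => key e == c)) := by
  intro arr
  induction arr using List.reverseRecOn with
  | nil => simp [PySem.List.sorted]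
  | append_singleton xs x ih =>
      intro hmem
      rw [PySem.List.sorted_eq_foldl_insertBy, List.foldl_append,
          ← PySem.List.sorted_eq_foldl_insertBy]
      simp only [List.foldl_cons, List.foldl_nil]
      rw [ih (fun e he => hmem e (by simp [he]))]
      have hx : key x ∈ ks := hmem x (by simp)
      obtain ⟨l1, l2, rfl⟩ := List.append_of_mem hx
      rw [List.pairwise_append] at hks
      obtain ⟨h1, h2, h12⟩ := hks
      rw [List.pairwise_cons] at h2
      obtain ⟨hxl2, _⟩ := h2
      -- LHS: the new element is inserted right after the buckets of keys ≤ its own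
      rw [List.flatMap_append, List.flatMap_cons, ← List.append_assoc]
      rw [pv_insertBy_append _ _ _ _ (by
        intro y hy
        rcases List.mem_append.1 hy with hy | hy
        · obtain ⟨c, hc, hyc⟩ := List.mem_flatMap.1 hy
          have : key y = c := by simpa using (List.mem_filter.1 hyc).2
          have hlt : key y < key x := this ▸ h12 c hc (key x) (by simp)
          exact decide_eq_false (not_lt_of_gt hlt)
        · have : key y = key x := by simpa using (List.mem_filter.1 hy).2
          exact decide_eq_false (by simp [this]))]
      rw [pv_insertBy_all_before _ _ _ (by
        intro z hz
        obtain ⟨c, hc, hzc⟩ := List.mem_flatMap.1 hz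
        have : key z = c := by simpa using (List.mem_filter.1 hzc).2
        exact decide_eq_true (this ▸ hxl2 c hc))]
      -- RHS: only the bucket of key x gains the new element
      rw [List.flatMap_append, List.flatMap_cons]
      have hf1 : ∀ c ∈ l1, (xs ++ [x]).filter (fun e => key e == c) = xs.filter (fun e => key e == c) := by
        intro c hc
        rw [List.filter_append]
        have : (key x == c) = false := by
          have := h12 c hc (key x) (by simp)
          simp [ne_of_gt this]
        simp [List.filter, this]
      have hf2 : ∀ c ∈ l2, (xs ++ [x]).filter (fun e => key e == c) = xs.filter (fun e => key e == c) := by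
        intro c hc
        rw [List.filter_append]
        have : (key x == c) = false := by
          have := hxl2 c hc
          simp [ne_of_lt this]
        simp [List.filter, this]
      have hfx : (xs ++ [x]).filter (fun e => key e == key x) = xs.filter (fun e => key e == key x) ++ [x] := by
        rw [List.filter_append]; simp [List.filter]
      rw [List.flatMap_congr hf1, List.flatMap_congr hf2, hfx]
      simp

-- the initial dict maps every key it will ever be asked for to []
theorem pv_d0_getD (c : Char) :
    (("0123456789".toList).foldl (fun d c => d.insert c ([] : List String)) PySem.Dict.empty).getD c []
      = ([] : List String) := by
  have h : "0123456789".toList = ['0','1','2','3','4','5','6','7','8','9'] := rfl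
  rw [h]
  simp only [List.foldl_cons, List.foldl_nil]
  simp [PySem.Dict.getD_insert]

-- A's bucket distribution followed by concatenation is the flatMap of the per-digit filters
theorem pv_A_eq_flatMap (arr : List String) (position : Int) :
    radix_sort_part arr position =
      ("0123456789".toList).flatMap (fun c => arr.filter (fun e => pvKey position e == c)) := by
  unfold radix_sort_part
  rw [PySem.List.foldl_append_eq_flatMap]
  simp only [List.nil_append]
  apply List.flatMap_congr
  intro c _
  rw [show (arr.foldl (fun d e => d.modify (pvKey position e) [] (fun l => l ++ [e]))
        (("0123456789".toList).foldl (fun d c => d.insert c ([] : List String)) PySem.Dict.empty))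
      = ((arr.map (fun e => (pvKey position e, e))).foldl (fun d p => d.modify p.1 [] (fun l => l ++ [p.2]))
        (("0123456789".toList).foldl (fun d c => d.insert c ([] : List String)) PySem.Dict.empty))
      from (List.foldl_map (f := fun (e : String) => (pvKey position e, e))
        (g := fun (d : PySem.Dict Char (List String)) (p : Char × String) => d.modify p.1 [] (fun l => l ++ [p.2])) (l := arr)
        (init := ("0123456789".toList).foldl (fun d c => d.insert c ([] : List String)) PySem.Dict.empty)).symm]
  rw [PySem.Dict.getD_foldl_modify_append, pv_d0_getD]
  rw [List.filter_map, List.map_map]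
  simp [Function.comp_def]

-- ===== VERDICT (by name: the statement is the Claim_ definition above) =====
theorem radix_sort_part_spec : Claim_equal_radix_sort_part := by
  intro arr position _ hpre
  unfold Spec_radix_sort_part radix_sort_part_alt
  rw [pv_A_eq_flatMap]
  refine (pv_sorted_buckets (pvKey position) _ (by decide) arr ?_).symm
  intro e he
  unfold Pre_radix_sort_part at hpre
  rw [List.all_eq_true] at hpre
  have h := hpre e he
  cases hg : PySem.Str.pyGet? e position with
  | none => rw [hg] at h; simp at h
  | some c =>
      rw [hg] at h
      simp at h
      have : pvKey position e = c := by unfold pvKey; rw [hg]; rfl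
      rw [this]
      exact pv_isdigit_mem c h
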